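-- pv_equiv track=rewrite | github.com/Ashani9696/Dubbing.lk-final-P | findSimilarity.py | categorize_pitch
-- ===== SOURCE A (Python) =====
-- def categorize_pitch(pitch_values):
--     # Define thresholds for Low, Medium, and High pitch levels
--     low_threshold = 100    # Lower range of human pitch frequencies (in Hz)
--     high_threshold = 300   # Upper range for many voices (in Hz)
--
--     # Categorize each pitch level
--     categories = []
--     for pitch in pitch_values:
--         if pitch < low_threshold:
--             categories.append("Low")
--         elif low_threshold <= pitch < high_threshold:
--             categories.append("Medium")
--         else:
--             categories.append("High")
--
--     return categories
-- ===== SOURCE B (Python) =====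
-- def categorize_pitch(pitch_values):
--     # Staged overwrite passes: start all-"High", demote to "Medium" below 300, then to "Low" below 100.
--     out = ["High"] * len(pitch_values)
--     out = ["Medium" if p < 300 else o for p, o in zip(pitch_values, out)]
--     out = ["Low" if p < 100 else o for p, o in zip(pitch_values, out)]
--     return out
-- ===== Notes on version B (the rewrite author's own statement) =====
-- stated objective: alternative
-- what changed: Replaces the single-pass if/elif branch chain with three staged passes: initialize every slot to "High", then a whole-list pass demoting entries below 300 to "Medium", then another demoting entries below 100 to "Low".
import Mathlib
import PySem

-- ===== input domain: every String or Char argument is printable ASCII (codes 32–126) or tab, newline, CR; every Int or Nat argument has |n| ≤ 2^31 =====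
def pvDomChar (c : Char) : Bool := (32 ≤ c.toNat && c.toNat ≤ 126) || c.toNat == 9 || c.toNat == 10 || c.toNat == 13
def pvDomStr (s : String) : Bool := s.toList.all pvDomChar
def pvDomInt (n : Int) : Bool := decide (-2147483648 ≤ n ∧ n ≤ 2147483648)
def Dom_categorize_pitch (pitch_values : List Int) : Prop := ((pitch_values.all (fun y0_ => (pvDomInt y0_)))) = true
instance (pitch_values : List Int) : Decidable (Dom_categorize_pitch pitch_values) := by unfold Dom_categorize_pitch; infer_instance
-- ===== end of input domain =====

-- B replaces the single-pass branch chain with staged overwrite passes (all-"High", then demote <300, then <100); alternative decomposition, same O(n) cost.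
-- ===== PORT A =====
def categorize_pitch (pitch_values : List Int) : List String :=
  pitch_values.foldl (fun categories pitch =>
    if pitch < 100 then categories ++ ["Low"]
    else if 100 ≤ pitch ∧ pitch < 300 then categories ++ ["Medium"]
    else categories ++ ["High"]) []

-- ===== PORT B =====
def categorize_pitch_alt (pitch_values : List Int) : List String :=
  let out := List.replicate pitch_values.length "High"
  let out := (pitch_values.zip out).map (fun po => if po.1 < 300 then "Medium" else po.2)
  let out := (pitch_values.zip out).map (fun po => if po.1 < 100 then "Low" else po.2)
  out

-- ===== PRECONDITION & SPEC =====
def Spec_categorize_pitch (pitch_values : List Int) (out : List String) : Prop := out = categorize_pitch_alt pitch_values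
instance (pitch_values : List Int) (out : List String) : Decidable (Spec_categorize_pitch pitch_values out) := by unfold Spec_categorize_pitch; infer_instance

-- ===== CLAIM (what is proved, stated in full; the proofs are below) =====
def Claim_equal_categorize_pitch : Prop := ∀ (pitch_values : List Int), Dom_categorize_pitch pitch_values → Spec_categorize_pitch pitch_values (categorize_pitch pitch_values)

-- ===== LEMMAS AND PROOFS =====
lemma categorize_pitch_alt_cons (p : Int) (ps : List Int) :
    categorize_pitch_alt (p :: ps)
      = (if p < 100 then "Low" else if p < 300 then "Medium" else "High") :: categorize_pitch_alt ps := by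
  simp only [categorize_pitch_alt, List.length_cons, List.replicate_succ, List.zip_cons_cons,
    List.map_cons]

lemma categorize_pitch_foldl (pitch_values : List Int) (acc : List String) :
    pitch_values.foldl (fun categories pitch =>
      if pitch < 100 then categories ++ ["Low"]
      else if 100 ≤ pitch ∧ pitch < 300 then categories ++ ["Medium"]
      else categories ++ ["High"]) acc
      = acc ++ categorize_pitch_alt pitch_values := by
  induction pitch_values generalizing acc with
  | nil => simp [categorize_pitch_alt]
  | cons p ps ih =>
    rw [List.foldl_cons, categorize_pitch_alt_cons]
    by_cases h1 : p < 100
    · rw [if_pos h1, if_pos h1, ih]; simp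
    · by_cases h2 : p < 300
      · rw [if_neg h1, if_pos ⟨by omega, h2⟩, if_neg h1, if_pos h2, ih]; simp
      · rw [if_neg h1, if_neg (by omega), if_neg h1, if_neg h2, ih]; simp

-- ===== VERDICT (by name: the statement is the Claim_ definition above) =====
theorem categorize_pitch_spec : Claim_equal_categorize_pitch := by
  intro xs _
  unfold Spec_categorize_pitch categorize_pitch
  simpa using categorize_pitch_foldl xs []
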